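-- pv_equiv track=rewrite | github.com/comsec-group/hybridift | docker/facilities/hybridift.py | __gen_is_bit_tainted_expr
-- ===== SOURCE A (Python) =====
-- def __signal_to_taint_signal_name(signal_name: str):
--     return f"{signal_name}_t0"
--
-- def __gen_is_bit_tainted_expr(anded_signal_names: list):
--     assert len(anded_signal_names) > 0, "The list of anded signal names should not be empty"
--
--
--     if len(anded_signal_names) == 1:
--         return f"{__signal_to_taint_signal_name(anded_signal_names[0])}"
--
--     else:
--         tainted_sub_expr = __gen_is_bit_tainted_expr(anded_signal_names[1:])
--         anded_subexpr = '&'.join(map(lambda s: f"({s})", anded_signal_names[1:]))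
--         tainted_first_signal = __signal_to_taint_signal_name(anded_signal_names[0])
--
--         return f"(({anded_signal_names[0]}) & ({tainted_sub_expr})) | (({tainted_first_signal}) & ({anded_subexpr})) | (({tainted_first_signal}) & ({tainted_sub_expr}))"
-- ===== SOURCE B (Python) =====
-- def __signal_to_taint_signal_name(signal_name: str):
--     return f"{signal_name}_t0"
--
-- def __gen_is_bit_tainted_expr(anded_signal_names: list):
--     assert len(anded_signal_names) > 0, "The list of anded signal names should not be empty"
--     last = anded_signal_names[-1]
--     result = __signal_to_taint_signal_name(last)
--     anded_subexpr = f"({last})"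
--     for s in reversed(anded_signal_names[:-1]):
--         t = __signal_to_taint_signal_name(s)
--         result = f"(({s}) & ({result})) | (({t}) & ({anded_subexpr})) | (({t}) & ({result}))"
--         anded_subexpr = f"({s})&" + anded_subexpr
--     return result
-- ===== Notes on version B (the rewrite author's own statement) =====
-- stated objective: alternative
-- what changed: The suffix recursion is replaced by one bottom-up loop over the reversed list that carries two accumulators, the result string and the '&'.join of the parenthesized suffix, so the join is extended incrementally instead of being recomputed for every suffix.
import Mathlib
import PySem

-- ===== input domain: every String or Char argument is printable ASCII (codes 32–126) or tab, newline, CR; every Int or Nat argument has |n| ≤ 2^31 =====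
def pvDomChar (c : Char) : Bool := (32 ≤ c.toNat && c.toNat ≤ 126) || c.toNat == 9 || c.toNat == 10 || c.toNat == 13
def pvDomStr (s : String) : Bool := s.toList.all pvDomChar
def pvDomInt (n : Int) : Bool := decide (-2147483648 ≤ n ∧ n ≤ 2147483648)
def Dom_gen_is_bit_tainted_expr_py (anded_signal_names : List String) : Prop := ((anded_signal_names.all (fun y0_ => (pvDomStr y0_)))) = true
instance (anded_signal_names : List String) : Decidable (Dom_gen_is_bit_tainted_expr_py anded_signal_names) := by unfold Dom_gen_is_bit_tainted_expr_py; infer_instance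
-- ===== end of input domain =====

-- B replaces A's suffix recursion by one bottom-up loop that maintains the result and the
-- '&'.join of the parenthesized suffix as two accumulators (objective: alternative).

-- shared module helper __signal_to_taint_signal_name
def pvTaint (signal_name : String) : String := signal_name ++ "_t0"

-- ===== PORT A =====
def gen_is_bit_tainted_expr_py : List String → String
  | [] => ""          -- Python A raises AssertionError here; excluded by Pre_
  | [x] => pvTaint x
  | x :: y :: rest =>
      let tainted_sub_expr := gen_is_bit_tainted_expr_py (y :: rest)
      let anded_subexpr := PySem.Str.join "&" ((y :: rest).map (fun s => "(" ++ s ++ ")"))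
      let tainted_first_signal := pvTaint x
      "((" ++ x ++ ") & (" ++ tainted_sub_expr ++ ")) | ((" ++ tainted_first_signal ++
        ") & (" ++ anded_subexpr ++ ")) | ((" ++ tainted_first_signal ++ ") & (" ++
        tainted_sub_expr ++ "))"

-- ===== PORT B =====
-- loop body: state = (result, anded_subexpr)
def pvStepB (st : String × String) (s : String) : String × String :=
  let t := pvTaint s
  ("((" ++ s ++ ") & (" ++ st.1 ++ ")) | ((" ++ t ++ ") & (" ++ st.2 ++ ")) | ((" ++ t ++
      ") & (" ++ st.1 ++ "))",
   "(" ++ s ++ ")" ++ "&" ++ st.2)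

-- names[-1] and reversed(names[:-1]) are read off names.reverse = last :: revInit
def gen_is_bit_tainted_expr_py_alt (anded_signal_names : List String) : String :=
  match anded_signal_names.reverse with
  | [] => ""          -- Python B raises AssertionError here; excluded by Pre_
  | last :: revInit =>
      (revInit.foldl pvStepB (pvTaint last, "(" ++ last ++ ")")).1

-- ===== PRECONDITION & SPEC =====
-- Pre_ excludes exactly the empty list, on which both Pythons raise AssertionError.
def Pre_gen_is_bit_tainted_expr_py (anded_signal_names : List String) : Prop :=
  anded_signal_names ≠ []
instance (anded_signal_names : List String) : Decidable (Pre_gen_is_bit_tainted_expr_py anded_signal_names) := by unfold Pre_gen_is_bit_tainted_expr_py; infer_instance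
def pvWitness_gen_is_bit_tainted_expr_py : List String := ["a", "b"]

def Spec_gen_is_bit_tainted_expr_py (anded_signal_names : List String) (out : String) : Prop := out = gen_is_bit_tainted_expr_py_alt anded_signal_names
instance (anded_signal_names : List String) (out : String) : Decidable (Spec_gen_is_bit_tainted_expr_py anded_signal_names out) := by unfold Spec_gen_is_bit_tainted_expr_py; infer_instance

-- ===== CLAIM (what is proved, stated in full; the proofs are below) =====
def Claim_equal_gen_is_bit_tainted_expr_py : Prop := ∀ (anded_signal_names : List String), Dom_gen_is_bit_tainted_expr_py anded_signal_names → Pre_gen_is_bit_tainted_expr_py anded_signal_names → Spec_gen_is_bit_tainted_expr_py anded_signal_names (gen_is_bit_tainted_expr_py anded_signal_names)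

-- ===== LEMMAS AND PROOFS =====
lemma pv_str_eq_of_toList {a b : String} (h : a.toList = b.toList) : a = b := by
  have := congrArg String.ofList h; simpa using this

lemma pv_join_cons (x y : String) (xs : List String) :
    PySem.Str.join "&" (x :: y :: xs) = x ++ "&" ++ PySem.Str.join "&" (y :: xs) := by
  apply pv_str_eq_of_toList
  simp [PySem.Str.join, PySem.Chars.join, List.intercalate]

lemma pv_join_singleton (x : String) : PySem.Str.join "&" [x] = x := by
  apply pv_str_eq_of_toList
  simp [PySem.Str.join, PySem.Chars.join, List.intercalate]

-- loop invariant: folding B's step back-to-front over init computes A's result on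
-- init ++ [last] together with the '&'.join of the parenthesized tail
lemma pv_loop_spec (init : List String) (last : String) :
    init.foldr (fun s st => pvStepB st s) (pvTaint last, "(" ++ last ++ ")") =
      (gen_is_bit_tainted_expr_py (init ++ [last]),
       PySem.Str.join "&" ((init ++ [last]).map (fun s => "(" ++ s ++ ")"))) := by
  induction init with
  | nil =>
      simp [gen_is_bit_tainted_expr_py, pv_join_singleton]
  | cons s init ih =>
      rcases h : init ++ [last] with _ | ⟨y, rest⟩
      · simp at h
      · have hfold : (s :: init).foldr (fun s st => pvStepB st s)
            (pvTaint last, "(" ++ last ++ ")") =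
            pvStepB (gen_is_bit_tainted_expr_py (y :: rest),
              PySem.Str.join "&" ((y :: rest).map (fun s => "(" ++ s ++ ")"))) s := by
          simp only [List.foldr_cons, ih, h]
        rw [hfold]
        have hA : gen_is_bit_tainted_expr_py (s :: init ++ [last]) =
            gen_is_bit_tainted_expr_py (s :: y :: rest) := by
          rw [List.cons_append, h]
        have hmap : ((s :: init ++ [last]).map (fun s => "(" ++ s ++ ")")) =
            ("(" ++ s ++ ")") :: ((y :: rest).map (fun s => "(" ++ s ++ ")")) := by
          rw [List.cons_append, h]; simp
        rw [hA, hmap]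
        cases hm : (y :: rest).map (fun s => "(" ++ s ++ ")") with
        | nil => simp at hm
        | cons p ps =>
            rw [pv_join_cons]
            simp [pvStepB, gen_is_bit_tainted_expr_py, hm]

-- ===== VERDICT (by name: the statement is the Claim_ definition above) =====
theorem gen_is_bit_tainted_expr_py_spec : Claim_equal_gen_is_bit_tainted_expr_py := by
  intro names _ hpre
  unfold Spec_gen_is_bit_tainted_expr_py
  rcases h : names.reverse with _ | ⟨last, revInit⟩
  · exact absurd (by simpa using congrArg List.reverse h) hpre
  · have hnames : names = revInit.reverse ++ [last] := by
      have := congrArg List.reverse h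
      simpa using this
    have hfold : revInit.foldl pvStepB (pvTaint last, "(" ++ last ++ ")") =
        revInit.reverse.foldr (fun s st => pvStepB st s)
          (pvTaint last, "(" ++ last ++ ")") := by
      rw [← List.reverse_reverse revInit, List.foldl_reverse]
      simp
    simp only [gen_is_bit_tainted_expr_py_alt, h]
    rw [hfold, pv_loop_spec, ← hnames]
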